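-- pv_equiv track=rewrite | github.com/errchh/aws-ai-hackathon-autoops | agents/promotion_agent.py | _generate_inventory_campaign_recommendations
-- ===== SOURCE A (Python) =====
-- from typing import Any, Dict, List, Optional, Tuple
--
-- def _generate_inventory_campaign_recommendations(
--     validation_results: List[Dict[str, Any]]
-- ) -> List[str]:
--     """Generate campaign recommendations based on inventory validation."""
--     recommendations = []
--
--     insufficient_products = [
--         r for r in validation_results if r["availability_status"] == "insufficient"
--     ]
--     if insufficient_products:
--         recommendations.append("Delay campaign launch until inventory is restocked")
--
--     limited_products = [
--         r for r in validation_results if r["availability_status"] == "limited"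
--     ]
--     if limited_products:
--         recommendations.append("Implement inventory monitoring during campaign")
--
--     return recommendations or ["Proceed with campaign as planned"]
-- ===== SOURCE B (Python) =====
-- def _generate_inventory_campaign_recommendations(validation_results):
--     """Generate campaign recommendations based on inventory validation."""
--     has_insufficient = False
--     has_limited = False
--     for r in validation_results:
--         status = r["availability_status"]
--         if status == "insufficient":
--             has_insufficient = True
--         elif status == "limited":
--             has_limited = True
--         if has_insufficient and has_limited:
--             break
--     recommendations = []
--     if has_insufficient:
--         recommendations.append("Delay campaign launch until inventory is restocked")
--     if has_limited:
--         recommendations.append("Implement inventory monitoring during campaign")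
--     return recommendations or ["Proceed with campaign as planned"]
-- ===== Notes on version B (the rewrite author's own statement) =====
-- stated objective: alternative
-- what changed: Replaces A's two throwaway list-building filter scans with a single early-exiting loop that tracks two boolean flags (stopping as soon as both statuses have been seen) and composes the recommendation list from the flags.
import Mathlib
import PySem

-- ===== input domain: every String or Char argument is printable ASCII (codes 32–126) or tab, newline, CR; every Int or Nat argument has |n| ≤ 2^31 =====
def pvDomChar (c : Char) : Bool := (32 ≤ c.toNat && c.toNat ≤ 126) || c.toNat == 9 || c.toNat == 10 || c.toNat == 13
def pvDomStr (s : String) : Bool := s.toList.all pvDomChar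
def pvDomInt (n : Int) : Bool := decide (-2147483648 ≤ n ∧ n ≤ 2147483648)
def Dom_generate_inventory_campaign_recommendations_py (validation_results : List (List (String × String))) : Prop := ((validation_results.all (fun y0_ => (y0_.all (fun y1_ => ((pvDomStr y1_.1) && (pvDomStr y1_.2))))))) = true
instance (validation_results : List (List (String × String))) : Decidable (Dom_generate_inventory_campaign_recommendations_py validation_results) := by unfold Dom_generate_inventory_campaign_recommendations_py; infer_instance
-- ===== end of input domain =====

-- B replaces A's two filter scans with one early-exiting flag-tracking pass (alternative decomposition, same cost).
-- ===== PORT A =====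
-- r["availability_status"]: Python dict lookup; assoc lists become dicts (later keys overwrite),
-- so the status is the LAST value for the key (PySem.Dict.ofList models this exactly).
def pvStatus (r : List (String × String)) : String :=
  ((PySem.Dict.ofList r).get? "availability_status").getD ""

def generate_inventory_campaign_recommendations_py (validation_results : List (List (String × String))) : List String :=
  let recommendations : List String := []
  let insufficient_products := validation_results.filter (fun r => pvStatus r == "insufficient")
  let recommendations := if !insufficient_products.isEmpty then recommendations ++ ["Delay campaign launch until inventory is restocked"] else recommendations
  let limited_products := validation_results.filter (fun r => pvStatus r == "limited")
  let recommendations := if !limited_products.isEmpty then recommendations ++ ["Implement inventory monitoring during campaign"] else recommendations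
  if recommendations.isEmpty then ["Proceed with campaign as planned"] else recommendations

-- ===== PORT B =====
-- the for-loop with flags and `break` once both flags are set
def pvScanFlags : List (List (String × String)) → Bool → Bool → Bool × Bool
  | [], has_insufficient, has_limited => (has_insufficient, has_limited)
  | r :: rest, has_insufficient, has_limited =>
      let status := pvStatus r
      let has_insufficient := if status == "insufficient" then true else has_insufficient
      let has_limited := if !(status == "insufficient") && status == "limited" then true else has_limited
      if has_insufficient && has_limited then (has_insufficient, has_limited)  -- break
      else pvScanFlags rest has_insufficient has_limited

def generate_inventory_campaign_recommendations_py_alt (validation_results : List (List (String × String))) : List String :=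
  let flags := pvScanFlags validation_results false false
  let recommendations : List String := []
  let recommendations := if flags.1 then recommendations ++ ["Delay campaign launch until inventory is restocked"] else recommendations
  let recommendations := if flags.2 then recommendations ++ ["Implement inventory monitoring during campaign"] else recommendations
  if recommendations.isEmpty then ["Proceed with campaign as planned"] else recommendations

-- ===== PRECONDITION & SPEC =====
-- Pre_ excludes exactly the inputs where some element lacks the "availability_status" key,
-- on which the Python A raises KeyError.
def Pre_generate_inventory_campaign_recommendations_py (validation_results : List (List (String × String))) : Prop :=
  ∀ r ∈ validation_results, (PySem.Dict.ofList r).contains "availability_status" = true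
instance (validation_results : List (List (String × String))) : Decidable (Pre_generate_inventory_campaign_recommendations_py validation_results) := by unfold Pre_generate_inventory_campaign_recommendations_py; infer_instance

def pvWitness_generate_inventory_campaign_recommendations_py : (List (List (String × String))) :=
  [[("availability_status", "insufficient")], [("availability_status", "ok")]]

def Spec_generate_inventory_campaign_recommendations_py (validation_results : List (List (String × String))) (out : List String) : Prop := out = generate_inventory_campaign_recommendations_py_alt validation_results
instance (validation_results : List (List (String × String))) (out : List String) : Decidable (Spec_generate_inventory_campaign_recommendations_py validation_results out) := by unfold Spec_generate_inventory_campaign_recommendations_py; infer_instance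

-- ===== CLAIM (what is proved, stated in full; the proofs are below) =====
def Claim_equal_generate_inventory_campaign_recommendations_py : Prop := ∀ (validation_results : List (List (String × String))), Dom_generate_inventory_campaign_recommendations_py validation_results → Pre_generate_inventory_campaign_recommendations_py validation_results → Spec_generate_inventory_campaign_recommendations_py validation_results (generate_inventory_campaign_recommendations_py validation_results)

-- ===== LEMMAS AND PROOFS =====
-- The early-exiting flag scan computes exactly "does some element have this status".
theorem pvScanFlags_spec (vrs : List (List (String × String))) (hi hl : Bool) :
    pvScanFlags vrs hi hl =
      (hi || vrs.any (fun r => pvStatus r == "insufficient"),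
       hl || vrs.any (fun r => pvStatus r == "limited")) := by
  induction vrs generalizing hi hl with
  | nil => simp [pvScanFlags]
  | cons r rest ih =>
    rcases h1 : pvStatus r == "insufficient" with _ | _ <;>
      rcases h2 : pvStatus r == "limited" with _ | _ <;>
      rcases hi with _ | _ <;> rcases hl with _ | _ <;>
      simp_all [pvScanFlags, List.any_cons]

-- A's "filter is nonempty" equals "some element has this status".
theorem pvFilter_isEmpty_eq (vrs : List (List (String × String))) (x : String) :
    (vrs.filter (fun r => pvStatus r == x)).isEmpty = !(vrs.any (fun r => pvStatus r == x)) := by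
  induction vrs with
  | nil => rfl
  | cons r rest ih =>
    by_cases h : pvStatus r == x <;> simp [h, ih]

-- ===== VERDICT (by name: the statement is the Claim_ definition above) =====
theorem generate_inventory_campaign_recommendations_py_spec : Claim_equal_generate_inventory_campaign_recommendations_py := by
  intro vrs _ _
  unfold Spec_generate_inventory_campaign_recommendations_py
  unfold generate_inventory_campaign_recommendations_py generate_inventory_campaign_recommendations_py_alt
  simp only [pvScanFlags_spec, Bool.false_or, pvFilter_isEmpty_eq, Bool.not_not]
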